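-- pv_equiv track=rewrite | github.com/Arsen1302/Code-copy-detector | TestData/solutions/problem_585_4.py | solution_585_4
-- ===== SOURCE A (Python) =====
-- def solution_585_4(s: str, k: int) -> str:
--     visited = set()
--     if k == 1:
--         arr = list(s)
--
--         while "".join(arr) not in visited:
--             visited.add("".join(arr))
--             ele = arr.pop(0)
--             arr.append(ele)
--
--
--
--         return min(visited)
--
--     ans = sorted(s)
--     return "".join(ans)
-- ===== SOURCE B (Python) =====
-- def solution_585_4(s: str, k: int) -> str:
--     if k == 1:
--         return min(s[i:] + s[:i] for i in range(len(s)))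
--     return "".join(sorted(s))
-- ===== Notes on version B (the rewrite author's own statement) =====
-- stated objective: alternative
-- what changed: For k=1, B takes the minimum over the n slice-built rotations directly by index, replacing A's mutating rotate-until-repeat cycle detection with a set, pop(0)/append and repeated joins; for other k both sort the characters.
import Mathlib
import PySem

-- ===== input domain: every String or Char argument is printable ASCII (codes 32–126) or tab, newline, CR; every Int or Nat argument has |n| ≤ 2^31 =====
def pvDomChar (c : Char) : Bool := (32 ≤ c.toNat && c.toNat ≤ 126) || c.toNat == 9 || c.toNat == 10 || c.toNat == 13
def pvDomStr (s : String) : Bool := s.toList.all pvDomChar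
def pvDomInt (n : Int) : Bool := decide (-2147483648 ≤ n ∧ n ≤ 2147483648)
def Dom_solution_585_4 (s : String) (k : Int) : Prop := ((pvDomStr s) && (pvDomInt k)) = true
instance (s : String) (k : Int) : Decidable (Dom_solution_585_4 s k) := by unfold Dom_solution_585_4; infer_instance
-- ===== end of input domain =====

-- B replaces A's mutating rotate-until-repeat cycle detection (set + pop(0)/append + repeated joins)
-- by a direct minimum over the n slice-built rotations for k = 1; the sorted-characters branch is shared.


-- ===== PORT A =====
-- the while loop: while "".join(arr) not in visited: visited.add("".join(arr)); ele = arr.pop(0); arr.append(ele)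
-- fuel = len(arr) + 1 steps always suffice (the rotation returns to the start after len(arr) steps);
-- the pop? = none branch is Python's IndexError on the empty string, excluded by Pre_.
def pvLoopA : Nat → PySem.Set String → List Char → PySem.Set String
  | 0, visited, _ => visited
  | fuel+1, visited, arr =>
    if PySem.Set.contains visited (String.ofList arr) then visited
    else
      match PySem.List.pop? arr 0 with
      | none => PySem.Set.add visited (String.ofList arr)
      | some (ele, rest) => pvLoopA fuel (PySem.Set.add visited (String.ofList arr)) (rest ++ [ele])

def solution_585_4 (s : String) (k : Int) : String :=
  if k == 1 then
    let arr := s.toList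
    let visited := pvLoopA (arr.length + 1) PySem.Set.empty arr
    (PySem.List.min? visited (fun x => x)).getD ""
  else
    String.ofList (PySem.List.sorted s.toList (fun c => c))

-- ===== PORT B =====
def solution_585_4_alt (s : String) (k : Int) : String :=
  if k == 1 then
    (PySem.List.min?
      ((PySem.List.pyRange 0 (PySem.Str.len s) 1).map
        (fun i => String.ofList (PySem.List.slice s.toList (some i) none ++ PySem.List.slice s.toList none (some i))))
      (fun x => x)).getD ""
  else
    String.ofList (PySem.List.sorted s.toList (fun c => c))

-- ===== PRECONDITION & SPEC =====
-- Pre_ excludes only s = "" with k = 1, where A raises IndexError (arr.pop(0) on []) and B raises ValueError (min of empty sequence).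
def Pre_solution_585_4 (s : String) (k : Int) : Prop := k = 1 → s ≠ ""
instance (s : String) (k : Int) : Decidable (Pre_solution_585_4 s k) := by unfold Pre_solution_585_4; infer_instance
def pvWitness_solution_585_4 : String × Int := ("ba", 1)

def Spec_solution_585_4 (s : String) (k : Int) (out : String) : Prop := out = solution_585_4_alt s k
instance (s : String) (k : Int) (out : String) : Decidable (Spec_solution_585_4 s k out) := by unfold Spec_solution_585_4; infer_instance

-- ===== CLAIM (what is proved, stated in full; the proofs are below) =====
def Claim_equal_solution_585_4 : Prop := ∀ (s : String) (k : Int), Dom_solution_585_4 s k → Pre_solution_585_4 s k → Spec_solution_585_4 s k (solution_585_4 s k)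

-- ===== LEMMAS AND PROOFS =====

-- The visited set after i loop steps: {rotations 0 .. i-1} in insertion order.
def pvVi (l : List Char) (i : Nat) : PySem.Set String :=
  PySem.Set.ofList ((List.range i).map (fun j => String.ofList (l.rotate j)))

theorem pvMem_Vi (l : List Char) (i : Nat) (x : String) :
    x ∈ pvVi l i ↔ ∃ j, j < i ∧ x = String.ofList (l.rotate j) := by
  simp [pvVi, PySem.Set.mem_ofList, List.mem_map, List.mem_range, eq_comm]

theorem pvVi_succ (l : List Char) (i : Nat) :
    pvVi l (i+1) = PySem.Set.add (pvVi l i) (String.ofList (l.rotate i)) := by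
  simp [pvVi, List.range_succ, PySem.Set.ofList, List.foldl_append]

theorem pvOfList_inj {l l' : List Char} (h : String.ofList l = String.ofList l') : l = l' := by
  have := congrArg String.toList h
  simpa using this

-- Once two rotations coincide, every rotation equals one with index < i.
theorem pvRot_cover (l : List Char) {i j : Nat} (hj : j < i) (hij : l.rotate i = l.rotate j) :
    ∀ t, ∃ u, u < i ∧ l.rotate t = l.rotate u := by
  intro t
  induction t using Nat.strong_induction_on with
  | _ t IH =>
    by_cases ht : t < i
    · exact ⟨t, ht, rfl⟩
    · rw [Nat.not_lt] at ht
      have h1 : l.rotate t = l.rotate (j + (t - i)) := by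
        have h2 : l.rotate t = (l.rotate i).rotate (t - i) := by
          rw [List.rotate_rotate]; congr 1; omega
        rw [h2, hij, List.rotate_rotate]
      obtain ⟨u, hu, he⟩ := IH (j + (t - i)) (by omega)
      exact ⟨u, hu, h1.trans he⟩

theorem pvContains_iff {v : PySem.Set String} {x : String} :
    PySem.Set.contains v x = true ↔ x ∈ v := by
  simp [PySem.Set.contains]

-- Main loop characterisation: run from state i with enough fuel; the result contains exactly the rotations.
theorem pvLoopA_mem (l : List Char) (hl : l ≠ []) :
    ∀ (fuel i : Nat), i ≤ l.length → l.length + 1 ≤ fuel + i →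
      ∀ x, x ∈ pvLoopA fuel (pvVi l i) (l.rotate i) ↔ ∃ t, x = String.ofList (l.rotate t) := by
  intro fuel
  induction fuel with
  | zero =>
    intro i hi hf x
    have : 0 < l.length := List.length_pos_of_ne_nil hl
    omega
  | succ fuel IH =>
    intro i hi hf x
    have hlen : 0 < l.length := List.length_pos_of_ne_nil hl
    by_cases hc : PySem.Set.contains (pvVi l i) (String.ofList (l.rotate i)) = true
    · have hmem := (pvContains_iff.mp hc)
      obtain ⟨j, hj, hje⟩ := (pvMem_Vi l i _).mp hmem
      have hij : l.rotate i = l.rotate j := pvOfList_inj hje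
      rw [pvLoopA, if_pos hc]
      constructor
      · rintro hx
        obtain ⟨j', _, rfl⟩ := (pvMem_Vi l i x).mp hx
        exact ⟨j', rfl⟩
      · rintro ⟨t, rfl⟩
        obtain ⟨u, hu, he⟩ := pvRot_cover l hj hij t
        exact (pvMem_Vi l i _).mpr ⟨u, hu, by rw [he]⟩
    · -- loop body runs: i < l.length must hold
      have hrot_ne : l.rotate i ≠ [] := by
        simp [List.rotate_eq_nil_iff]; exact hl
      obtain ⟨a, tl, he⟩ : ∃ a tl, l.rotate i = a :: tl := by
        cases h : l.rotate i with
        | nil => exact absurd h hrot_ne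
        | cons a tl => exact ⟨a, tl, rfl⟩
      have hi_lt : i < l.length := by
        rcases Nat.lt_or_ge i l.length with h | h
        · exact h
        · exfalso
          have hieq : i = l.length := le_antisymm hi h
          have h0 : String.ofList (l.rotate i) ∈ pvVi l i := by
            refine (pvMem_Vi l i _).mpr ⟨0, by omega, ?_⟩
            rw [hieq, List.rotate_length, List.rotate_zero]
          exact hc (pvContains_iff.mpr h0)
      have hstep : tl ++ [a] = l.rotate (i + 1) := by
        have : (l.rotate i).rotate 1 = l.rotate (i + 1) := by
          rw [List.rotate_rotate]
        rw [← this, he]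
        simpa using (List.rotate_cons_succ tl a 0).symm
      have hVadd : PySem.Set.add (pvVi l i) (String.ofList (a :: tl)) = pvVi l (i+1) := by
        rw [pvVi_succ, he]
      rw [pvLoopA, if_neg hc, he, PySem.List.pop?_zero_cons]
      dsimp only
      rw [hVadd, hstep]
      exact IH (i+1) (by omega) (by omega) x

theorem pvMinD_eq (xs ys : List String) (hx : xs ≠ []) (hy : ys ≠ []) (h : ∀ a, a ∈ xs ↔ a ∈ ys) :
    (PySem.List.min? xs (fun x => x)).getD "" = (PySem.List.min? ys (fun x => x)).getD "" := by
  cases hm1 : PySem.List.min? xs (fun x => x) with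
  | none => exact absurd ((PySem.List.min?_eq_none_iff xs _).mp hm1) hx
  | some m1 =>
    cases hm2 : PySem.List.min? ys (fun x => x) with
    | none => exact absurd ((PySem.List.min?_eq_none_iff ys _).mp hm2) hy
    | some m2 =>
      simp only [Option.getD_some]
      have h1 := PySem.List.min?_mem hm1
      have h2 := PySem.List.min?_mem hm2
      have le1 : m1 ≤ m2 := PySem.List.min?_isMin hm1 m2 ((h m2).mpr h2)
      have le2 : m2 ≤ m1 := PySem.List.min?_isMin hm2 m1 ((h m1).mp h1)
      exact le_antisymm le1 le2

-- ===== VERDICT (by name: the statement is the Claim_ definition above) =====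
theorem solution_585_4_spec : Claim_equal_solution_585_4 := by
  intro s k hdom hpre
  unfold Spec_solution_585_4 solution_585_4 solution_585_4_alt
  by_cases hk : (k == 1) = true
  · simp only [hk, if_true]
    have hk1 : k = 1 := by simpa using hk
    have hs : s ≠ "" := hpre hk1
    set l := s.toList with hls
    have hl : l ≠ [] := by
      intro h
      apply hs
      have := congrArg String.ofList h
      simpa [hls] using this
    have hlen : 0 < l.length := List.length_pos_of_ne_nil hl
    -- A's visited set
    have hW : ∀ x, x ∈ pvLoopA (l.length + 1) PySem.Set.empty l ↔
        ∃ t, x = String.ofList (l.rotate t) := by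
      have h0 : pvVi l 0 = PySem.Set.empty := by simp [pvVi, PySem.Set.ofList]
      have := pvLoopA_mem l hl (l.length + 1) 0 (by omega) (by omega)
      simpa [h0] using this
    -- B's rotation list
    have hRlist : (PySem.List.pyRange 0 (PySem.Str.len s) 1).map
          (fun i => String.ofList (PySem.List.slice s.toList (some i) none ++ PySem.List.slice s.toList none (some i)))
        = (List.range l.length).map (fun j => String.ofList (l.rotate j)) := by
      rw [show PySem.Str.len s = (l.length : Int) by simp [PySem.Str.len_eq, hls]]
      rw [PySem.List.pyRange_one]
      simp only [Int.sub_zero, Int.toNat_natCast, List.map_map]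
      apply List.map_congr_left
      intro j hj
      have hjn : j < l.length := List.mem_range.mp hj
      simp only [Function.comp, Int.zero_add, ← hls]
      rw [PySem.List.slice_from_natCast, PySem.List.slice_to_natCast]
      rw [← List.rotate_eq_drop_append_take (le_of_lt hjn)]
    have hR : ∀ x, x ∈ (List.range l.length).map (fun j => String.ofList (l.rotate j)) ↔
        ∃ t, x = String.ofList (l.rotate t) := by
      intro x
      constructor
      · rintro hx
        simp only [List.mem_map, List.mem_range] at hx
        obtain ⟨j, _, rfl⟩ := hx
        exact ⟨j, rfl⟩
      · rintro ⟨t, rfl⟩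
        simp only [List.mem_map, List.mem_range]
        refine ⟨t % l.length, Nat.mod_lt t hlen, ?_⟩
        rw [List.rotate_mod]
    -- nonemptiness
    have hWne : pvLoopA (l.length + 1) PySem.Set.empty l ≠ [] := by
      intro h
      have := (hW (String.ofList (l.rotate 0))).mpr ⟨0, rfl⟩
      rw [h] at this
      exact absurd this (List.not_mem_nil)
    have hRne : (List.range l.length).map (fun j => String.ofList (l.rotate j)) ≠ [] := by
      simp [List.range_eq_nil]
      omega
    rw [hRlist]
    exact pvMinD_eq _ _ hWne hRne (fun a => (hW a).trans (hR a).symm)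
  · simp [hk]
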